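-- pv_equiv track=rewrite | github.com/goldaev51/nlp-project | src/emotion/labels.py | choose_mood_for_emotions
-- ===== SOURCE A (Python) =====
-- from typing import Dict, List, Optional
--
-- EMOTION_TO_MOOD: Dict[str, str] = {
--     "admiration": "calm",
--     "amusement": "calm",
--     "approval": "calm",
--     "caring": "calm",
--     "curiosity": "calm",
--     "desire": "calm",
--     "excitement": "calm",
--     "gratitude": "calm",
--     "joy": "calm",
--     "love": "calm",
--     "optimism": "calm",
--     "pride": "calm",
--     "realization": "calm",
--     "relief": "calm",
--     "surprise": "calm",
--     "neutral": "calm",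
--
--     "anger": "annoyed",
--     "annoyance": "annoyed",
--     "disappointment": "annoyed",
--     "disapproval": "annoyed",
--     "disgust": "annoyed",
--     "remorse": "annoyed",
--     "sadness": "annoyed",
--     "grief": "annoyed",
--
--     "confusion": "confused",
--     "embarrassment": "confused",
--     "fear": "confused",
--     "nervousness": "confused",
-- }
--
-- MOOD_PRIORITY: List[str] = ["annoyed", "confused", "calm"]
--
-- def choose_mood_for_emotions(emotions: List[str]) -> Optional[str]:
--     moods = set()
--     for e in emotions:
--         mood = EMOTION_TO_MOOD.get(e)
--         if mood is not None:
--             moods.add(mood)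
--
--     if not moods:
--         return None
--
--     for mood in MOOD_PRIORITY:
--         if mood in moods:
--             return mood
--
--     return None
-- ===== SOURCE B (Python) =====
-- from typing import Dict, List, Optional
--
-- EMOTION_TO_MOOD: Dict[str, str] = {
--     "admiration": "calm", "amusement": "calm", "approval": "calm",
--     "caring": "calm", "curiosity": "calm", "desire": "calm",
--     "excitement": "calm", "gratitude": "calm", "joy": "calm",
--     "love": "calm", "optimism": "calm", "pride": "calm",
--     "realization": "calm", "relief": "calm", "surprise": "calm",
--     "neutral": "calm",
--     "anger": "annoyed", "annoyance": "annoyed", "disappointment": "annoyed",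
--     "disapproval": "annoyed", "disgust": "annoyed", "remorse": "annoyed",
--     "sadness": "annoyed", "grief": "annoyed",
--     "confusion": "confused", "embarrassment": "confused",
--     "fear": "confused", "nervousness": "confused",
-- }
--
-- MOOD_PRIORITY: List[str] = ["annoyed", "confused", "calm"]
--
-- MOOD_RANK: Dict[str, int] = {m: i for i, m in enumerate(MOOD_PRIORITY)}
--
-- def choose_mood_for_emotions(emotions: List[str]) -> Optional[str]:
--     # Single pass keeping the best (smallest) priority rank seen; no set, no second scan.
--     best = len(MOOD_PRIORITY)
--     for e in emotions:
--         mood = EMOTION_TO_MOOD.get(e)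
--         if mood is not None:
--             r = MOOD_RANK[mood]
--             if r < best:
--                 best = r
--     if best == len(MOOD_PRIORITY):
--         return None
--     return MOOD_PRIORITY[best]
-- ===== Notes on version B (the rewrite author's own statement) =====
-- stated objective: alternative
-- what changed: Replaces the mood-set accumulation plus a second priority-list scan with a single fold that keeps the minimal priority rank seen (via a rank dict), returning MOOD_PRIORITY[best] or None after the one pass.
import Mathlib
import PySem

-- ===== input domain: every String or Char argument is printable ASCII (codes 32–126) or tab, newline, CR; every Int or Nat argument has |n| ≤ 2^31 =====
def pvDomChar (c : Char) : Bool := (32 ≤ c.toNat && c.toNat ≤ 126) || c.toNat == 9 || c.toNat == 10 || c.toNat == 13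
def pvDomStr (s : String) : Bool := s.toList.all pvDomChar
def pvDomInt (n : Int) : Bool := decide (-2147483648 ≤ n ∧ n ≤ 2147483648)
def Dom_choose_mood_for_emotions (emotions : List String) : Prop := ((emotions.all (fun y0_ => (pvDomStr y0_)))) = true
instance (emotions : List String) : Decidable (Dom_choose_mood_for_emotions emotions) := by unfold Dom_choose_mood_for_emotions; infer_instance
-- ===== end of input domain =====

-- B replaces A's mood-set accumulation plus second priority-scan loop by one fold that
-- keeps the minimal priority rank seen, then indexes MOOD_PRIORITY once (objective: alternative).

-- ===== PORT A =====
def emotionToMood : PySem.Dict String String := PySem.Dict.ofList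
  [("admiration", "calm"), ("amusement", "calm"), ("approval", "calm"),
   ("caring", "calm"), ("curiosity", "calm"), ("desire", "calm"),
   ("excitement", "calm"), ("gratitude", "calm"), ("joy", "calm"),
   ("love", "calm"), ("optimism", "calm"), ("pride", "calm"),
   ("realization", "calm"), ("relief", "calm"), ("surprise", "calm"),
   ("neutral", "calm"),
   ("anger", "annoyed"), ("annoyance", "annoyed"), ("disappointment", "annoyed"),
   ("disapproval", "annoyed"), ("disgust", "annoyed"), ("remorse", "annoyed"),
   ("sadness", "annoyed"), ("grief", "annoyed"),
   ("confusion", "confused"), ("embarrassment", "confused"),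
   ("fear", "confused"), ("nervousness", "confused")]

def moodPriority : List String := ["annoyed", "confused", "calm"]

-- the body of A's first loop: look up e, add its mood to the set if present
def moodStep (s : PySem.Set String) (e : String) : PySem.Set String :=
  match emotionToMood.get? e with
  | some mood => PySem.Set.add s mood
  | none => s

-- A's second loop: first mood of the priority list that is in the set, else None
def prioScan (moods : PySem.Set String) : List String → Option String
  | [] => none
  | mood :: rest => if PySem.Set.contains moods mood then some mood else prioScan moods rest

def choose_mood_for_emotions (emotions : List String) : Option String :=
  let moods : PySem.Set String := emotions.foldl moodStep PySem.Set.empty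
  if moods = [] then none
  else prioScan moods moodPriority

-- ===== PORT B =====
-- MOOD_RANK = {m: i for i, m in enumerate(MOOD_PRIORITY)}
def moodRank : PySem.Dict String Int := PySem.Dict.ofList
  ((PySem.List.enumerate moodPriority).map (fun p => (p.2, p.1)))

-- body of B's single loop; MOOD_RANK[mood] cannot raise (every EMOTION_TO_MOOD value is
-- a key of MOOD_RANK), so the none branch keeping `best` is unreachable.
def rankStep (best : Int) (e : String) : Int :=
  match emotionToMood.get? e with
  | some mood =>
      match moodRank.get? mood with
      | some r => if r < best then r else best
      | none => best
  | none => best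

def choose_mood_for_emotions_alt (emotions : List String) : Option String :=
  let best := emotions.foldl rankStep (moodPriority.length : Int)
  if best == (moodPriority.length : Int) then none
  else PySem.List.pyGet? moodPriority best

-- ===== PRECONDITION & SPEC =====
def Spec_choose_mood_for_emotions (emotions : List String) (out : Option String) : Prop := out = choose_mood_for_emotions_alt emotions
instance (emotions : List String) (out : Option String) : Decidable (Spec_choose_mood_for_emotions emotions out) := by unfold Spec_choose_mood_for_emotions; infer_instance

-- ===== CLAIM (what is proved, stated in full; the proofs are below) =====
def Claim_equal_choose_mood_for_emotions : Prop := ∀ (emotions : List String), Dom_choose_mood_for_emotions emotions → Spec_choose_mood_for_emotions emotions (choose_mood_for_emotions emotions)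

-- ===== LEMMAS AND PROOFS =====

-- every value of EMOTION_TO_MOOD is one of the three priority moods
theorem mood_values (e m : String) (h : emotionToMood.get? e = some m) :
    m = "annoyed" ∨ m = "confused" ∨ m = "calm" := by
  have hm := PySem.Dict.mem_items_of_get?_eq_some emotionToMood h
  have hall : emotionToMood.items.all
      (fun p => p.2 == "annoyed" || p.2 == "confused" || p.2 == "calm") = true := by decide
  have := List.all_eq_true.mp hall _ hm
  simp at this; tauto

-- the three any-tests driving both programs
def anyMood (emotions : List String) (m : String) : Bool :=
  emotions.any (fun e => emotionToMood.get? e == some m)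

-- membership in A's accumulated set = the any-test
theorem contains_foldl_moodStep (es : List String) (s : PySem.Set String) (m : String) :
    PySem.Set.contains (es.foldl moodStep s) m
      = (PySem.Set.contains s m || anyMood es m) := by
  induction es generalizing s with
  | nil => simp [anyMood]
  | cons e rest ih =>
    have hstep : PySem.Set.contains (moodStep s e) m
        = (PySem.Set.contains s m || (emotionToMood.get? e == some m)) := by
      unfold moodStep
      cases h : emotionToMood.get? e with
      | none => simp
      | some mood =>
        rw [Bool.eq_iff_iff, Bool.or_eq_true]
        simp only [PySem.Set.contains_iff, PySem.Set.mem_add, beq_iff_eq, Option.some.injEq]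
        tauto
    rw [List.foldl_cons, ih, hstep, Bool.or_assoc]
    simp [anyMood]

-- the value B's fold computes, as a closed form on the three any-tests
def bestRank (emotions : List String) : Int :=
  if anyMood emotions "annoyed" then 0
  else if anyMood emotions "confused" then 1
  else if anyMood emotions "calm" then 2
  else 3

-- the rank B's loop body charges a single emotion with (3 = no mood)
def rankOf (e : String) : Int :=
  match emotionToMood.get? e with
  | some m => if m = "annoyed" then 0 else if m = "confused" then 1 else 2
  | none => 3

theorem rankStep_eq_min (b : Int) (e : String) (hb : b ≤ 3) :
    rankStep b e = min b (rankOf e) := by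
  unfold rankStep rankOf
  cases h : emotionToMood.get? e with
  | none => simp [min_def]; omega
  | some mood =>
    rcases mood_values e mood h with hm | hm | hm <;> subst hm <;>
      simp [show moodRank.get? "annoyed" = some 0 from rfl,
            show moodRank.get? "confused" = some 1 from rfl,
            show moodRank.get? "calm" = some 2 from rfl, min_def] <;>
      split_ifs <;> omega

theorem bestRank_cons (e : String) (rest : List String) :
    bestRank (e :: rest) = min (rankOf e) (bestRank rest) := by
  have hsplit : ∀ m, anyMood (e :: rest) m
      = ((emotionToMood.get? e == some m) || anyMood rest m) := by
    intro m; simp [anyMood]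
  unfold bestRank rankOf
  rw [hsplit "annoyed", hsplit "confused", hsplit "calm"]
  cases h : emotionToMood.get? e with
  | none => simp [min_def]; split_ifs <;> omega
  | some mood =>
    rcases mood_values e mood h with hm | hm | hm <;> subst hm <;>
      simp [min_def] <;> split_ifs <;> omega

theorem foldl_rankStep (es : List String) (b : Int) (hb : b ≤ 3) :
    es.foldl rankStep b = min b (bestRank es) := by
  induction es generalizing b with
  | nil => simp [bestRank, anyMood, min_def]; omega
  | cons e rest ih =>
    rw [List.foldl_cons, rankStep_eq_min b e hb,
        ih _ (le_trans (min_le_left _ _) hb), bestRank_cons, min_assoc]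

theorem choose_mood_for_emotions_eq (emotions : List String) :
    choose_mood_for_emotions emotions = choose_mood_for_emotions_alt emotions := by
  unfold choose_mood_for_emotions choose_mood_for_emotions_alt
  have hc : ∀ m, PySem.Set.contains (emotions.foldl moodStep PySem.Set.empty) m
      = anyMood emotions m := by
    intro m; rw [contains_foldl_moodStep]; simp [PySem.Set.empty]
  have hbest : emotions.foldl rankStep (moodPriority.length : Int) = bestRank emotions := by
    rw [show ((moodPriority.length : Nat) : Int) = 3 from rfl, foldl_rankStep _ _ le_rfl]
    unfold bestRank; split_ifs <;> omega
  rw [hbest]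
  by_cases he : emotions.foldl moodStep PySem.Set.empty = []
  · have hfalse : ∀ m, anyMood emotions m = false := by
      intro m; rw [← hc m, he]; rfl
    rw [if_pos he]
    simp [bestRank, hfalse, moodPriority]
  · rw [if_neg he]
    have hne : anyMood emotions "annoyed" || anyMood emotions "confused"
        || anyMood emotions "calm" := by
      by_contra hall
      apply he
      rcases hlist : emotions.foldl moodStep PySem.Set.empty with _ | ⟨m, rest⟩
      · rfl
      · exfalso
        have hmem : PySem.Set.contains (emotions.foldl moodStep PySem.Set.empty) m := by
          rw [hlist]; simp [PySem.Set.contains]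
        rw [hc m] at hmem
        -- m must be one of the three moods: it was added by moodStep from a dict value
        have hsome := hmem
        simp only [anyMood, List.any_eq_true, beq_iff_eq] at hsome
        obtain ⟨e, _, he'⟩ := hsome
        rcases mood_values e m he' with hm | hm | hm <;> subst hm <;> simp_all
    simp only [prioScan, moodPriority, hc, bestRank]
    rcases ha : anyMood emotions "annoyed" <;>
      rcases hcn : anyMood emotions "confused" <;>
      rcases hk : anyMood emotions "calm" <;>
      simp_all [PySem.List.pyGet?, PySem.List.pyIdx?, moodPriority]

-- ===== VERDICT (by name: the statement is the Claim_ definition above) =====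
theorem choose_mood_for_emotions_spec : Claim_equal_choose_mood_for_emotions := by
  intro emotions _
  exact choose_mood_for_emotions_eq emotions
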